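-- pv_equiv track=rewrite | github.com/zjzhou521/DRRN-tensorflow2 | train_DRRN.py | get_image_name
-- ===== SOURCE A (Python) =====
-- def get_image_name(path):
--     i = 0
--     name_flag = 0
--     image_name = ""
--     if(path[0]=='.'): i += 2
--     while(i<len(path)):
--         if(name_flag!=0):
--             image_name += path[i]
--         if(path[i]=='/'):
--             name_flag = 1
--         i += 1
--     if('/' in image_name):
--         return get_image_name(image_name)
--     else:
--         return image_name
-- ===== SOURCE B (Python) =====
-- def get_image_name(path):
--     s = path
--     while True:
--         start = 2 if s[0] == '.' else 0
--         idx = s.find('/', start)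
--         rest = s[idx + 1:] if idx != -1 else ""
--         if '/' in rest:
--             s = rest
--         else:
--             return rest
-- ===== Notes on version B (the rewrite author's own statement) =====
-- stated objective: faster
-- what changed: Replaces the char-by-char flag/accumulator scan plus tail recursion with an iterative loop that locates the first slash via str.find and takes the suffix by slicing, so no intermediate string is built one character at a time.
import Mathlib
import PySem

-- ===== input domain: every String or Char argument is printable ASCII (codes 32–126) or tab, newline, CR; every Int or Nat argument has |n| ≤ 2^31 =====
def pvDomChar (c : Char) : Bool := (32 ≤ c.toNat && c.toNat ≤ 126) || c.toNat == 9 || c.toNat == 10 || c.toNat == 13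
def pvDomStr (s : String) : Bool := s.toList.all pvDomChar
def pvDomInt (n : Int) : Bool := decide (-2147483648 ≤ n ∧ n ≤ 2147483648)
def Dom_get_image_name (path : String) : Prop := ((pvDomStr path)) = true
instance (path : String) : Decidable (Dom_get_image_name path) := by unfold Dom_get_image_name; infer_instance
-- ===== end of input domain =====

-- B replaces A's char-by-char flag/accumulator scan plus tail recursion with an
-- iterative find-the-slash-and-slice loop; same return value on every nonempty path.

-- ===== PORT A =====
-- A's while loop: walk the chars from index `start`, appending path[i] to the
-- accumulator whenever a '/' has already been seen, then set the flag on '/'.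
def runA : List Char → Bool → List Char → List Char
  | [], _, acc => acc
  | c :: rest, flag, acc =>
      runA rest (if c = '/' then true else flag) (if flag then acc ++ [c] else acc)

-- needed by get_image_name's termination (cited in decreasing_by)
theorem runA_shrink (xs : List Char) :
    runA xs false [] = [] ∨ (runA xs false []).length < xs.length := by
  induction xs with
  | nil => exact Or.inl rfl
  | cons c r ih =>
      by_cases hc : c = '/'
      · right
        have ht : ∀ (ys : List Char) (acc : List Char), runA ys true acc = acc ++ ys := by
          intro ys
          induction ys with
          | nil => intro acc; simp [runA]
          | cons d t iht => intro acc; simp [runA, iht]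
        simp [runA, hc, ht]
      · rcases ih with h | h
        · exact Or.inl (by simp only [runA, hc, if_false]; simpa using h)
        · right
          simp only [runA, hc, if_false]
          simpa using Nat.lt_succ_of_lt h

def get_image_name_core (l : List Char) : List Char :=
  let start : Nat := if l.head? = some '.' then 2 else 0
  let name := runA (l.drop start) false []
  if _h : '/' ∈ name then get_image_name_core name else name
termination_by l.length
decreasing_by
  have h' : '/' ∈ runA (l.drop (if l.head? = some '.' then 2 else 0)) false [] := _h
  show (runA (l.drop (if l.head? = some '.' then 2 else 0)) false []).length < l.length
  rcases runA_shrink (l.drop (if l.head? = some '.' then 2 else 0)) with h0 | h0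
  · rw [h0] at h'; cases h'
  · have hle : (l.drop (if l.head? = some '.' then 2 else 0)).length ≤ l.length := by
      simp [List.length_drop]
    exact lt_of_lt_of_le h0 hle

def get_image_name (path : String) : String := String.ofList (get_image_name_core path.toList)

-- ===== PORT B =====
-- B's while loop: start = 2 if s[0]=='.' else 0; idx = s.find('/', start);
-- rest = s[idx+1:] if idx != -1 else ''; loop on rest while it contains '/'.
def bCore (s : List Char) : List Char :=
  let start : Nat := if s.head? = some '.' then 2 else 0
  let rest :=
    match (s.drop start).findIdx? (· == '/') with
    | some j => s.drop (start + j + 1)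
    | none => []
  if _h : '/' ∈ rest then bCore rest else rest
termination_by s.length
decreasing_by
  have h' : '/' ∈ (match (s.drop (if s.head? = some '.' then 2 else 0)).findIdx? (· == '/') with
      | some j => s.drop ((if s.head? = some '.' then 2 else 0) + j + 1)
      | none => ([] : List Char)) := _h
  show (match (s.drop (if s.head? = some '.' then 2 else 0)).findIdx? (· == '/') with
      | some j => s.drop ((if s.head? = some '.' then 2 else 0) + j + 1)
      | none => ([] : List Char)).length < s.length
  cases hj : (s.drop (if s.head? = some '.' then 2 else 0)).findIdx? (· == '/') with
  | none => simp only [hj] at h'; cases h'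
  | some j =>
      simp only [hj] at h' ⊢
      have hpos := List.length_pos_of_mem h'
      simp only [List.length_drop] at hpos ⊢
      omega

def get_image_name_alt (path : String) : String := String.ofList (bCore path.toList)

-- ===== PRECONDITION & SPEC =====
-- Pre_ excludes only the empty string, on which A raises IndexError (path[0]).
def Pre_get_image_name (path : String) : Prop := path ≠ ""
instance (path : String) : Decidable (Pre_get_image_name path) := by unfold Pre_get_image_name; infer_instance
def pvWitness_get_image_name : String := "a/b.png"
def Spec_get_image_name (path : String) (out : String) : Prop := out = get_image_name_alt path
instance (path : String) (out : String) : Decidable (Spec_get_image_name path out) := by unfold Spec_get_image_name; infer_instance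

-- ===== CLAIM (what is proved, stated in full; the proofs are below) =====
def Claim_equal_get_image_name : Prop := ∀ (path : String), Dom_get_image_name path → Pre_get_image_name path → Spec_get_image_name path (get_image_name path)

-- ===== LEMMAS AND PROOFS =====
theorem runA_true_eq (ys : List Char) (acc : List Char) : runA ys true acc = acc ++ ys := by
  induction ys generalizing acc with
  | nil => simp [runA]
  | cons d t ih => simp [runA, ih]

-- A's scan with flag=false, acc=[] produces exactly B's "suffix after the first slash, else []".
theorem runA_false_eq (xs : List Char) :
    runA xs false [] =
      (match xs.findIdx? (· == '/') with
       | some j => xs.drop (j + 1)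
       | none => []) := by
  induction xs with
  | nil => simp [runA]
  | cons c r ih =>
      by_cases hc : c = '/'
      · simp [runA, hc, runA_true_eq, List.findIdx?_cons]
      · rw [show runA (c :: r) false [] = runA r false [] from by simp [runA, hc]]
        rw [ih]
        simp only [List.findIdx?_cons, beq_iff_eq, hc, if_false]
        cases hr : r.findIdx? (· == '/') with
        | none => simp
        | some j => simp

theorem core_eq_aux : ∀ (n : Nat) (l : List Char), l.length ≤ n → get_image_name_core l = bCore l := by
  intro n
  induction n with
  | zero =>
      intro l hl
      have : l = [] := List.eq_nil_of_length_eq_zero (Nat.le_zero.mp hl)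
      subst this
      unfold get_image_name_core bCore
      simp [runA]
  | succ n ih =>
      intro l hl
      unfold get_image_name_core bCore
      simp only [runA_false_eq, List.drop_drop]
      cases hj : ((l.drop (if l.head? = some '.' then 2 else 0)).findIdx? (· == '/')) with
      | none => simp
      | some j =>
          simp only [Nat.add_assoc]
          by_cases hm : '/' ∈ l.drop ((if l.head? = some '.' then 2 else 0) + (j + 1))
          · simp only [hm, reduceDIte]
            apply ih
            have hpos := List.length_pos_of_mem hm
            have hlen : (l.drop ((if l.head? = some '.' then 2 else 0) + (j + 1))).length
                = l.length - ((if l.head? = some '.' then 2 else 0) + (j + 1)) := by simp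
            omega
          · simp [hm]

theorem core_eq (l : List Char) : get_image_name_core l = bCore l :=
  core_eq_aux l.length l le_rfl

-- ===== VERDICT (by name: the statement is the Claim_ definition above) =====
theorem get_image_name_spec : Claim_equal_get_image_name := by
  intro path _ _
  unfold Spec_get_image_name get_image_name get_image_name_alt
  rw [core_eq]
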